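-- pv_equiv track=rewrite | github.com/Sorune/Programers | 푼 문제/solve1.py | solution
-- ===== SOURCE A (Python) =====
-- def solution(numbers):
--     catalog=[]
--     for i in range(len(numbers)):
--         for l in range(len(numbers)):
--             a=0
--             a=numbers[i]+numbers[l]
--             catalog.append(a)
--         b=0
--         b=numbers[i]*2
--         catalog.remove(b)
--     catalog=list(set(catalog))
--     catalog.sort()
--     answer = catalog
--     return answer
-- ===== SOURCE B (Python) =====
-- def solution(numbers):
--     counts = {}
--     for x in numbers:
--         counts[x] = counts.get(x, 0) + 1
--     sums = set()
--     rest = list(counts)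
--     while rest:
--         v = rest.pop(0)
--         for w in rest:
--             sums.add(v + w)
--     for v, c in counts.items():
--         if c >= 2:
--             sums.add(v + v)
--     return sorted(sums)
-- ===== Notes on version B (the rewrite author's own statement) =====
-- stated objective: faster
-- what changed: A appends all n^2 index-pair sums then calls list.remove (a linear scan over the huge catalog) once per element before dedup+sort; B counts occurrences in a dict once and forms sums only over unordered pairs of distinct unique values, adding 2*v exactly when v occurs at least twice.
import Mathlib
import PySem

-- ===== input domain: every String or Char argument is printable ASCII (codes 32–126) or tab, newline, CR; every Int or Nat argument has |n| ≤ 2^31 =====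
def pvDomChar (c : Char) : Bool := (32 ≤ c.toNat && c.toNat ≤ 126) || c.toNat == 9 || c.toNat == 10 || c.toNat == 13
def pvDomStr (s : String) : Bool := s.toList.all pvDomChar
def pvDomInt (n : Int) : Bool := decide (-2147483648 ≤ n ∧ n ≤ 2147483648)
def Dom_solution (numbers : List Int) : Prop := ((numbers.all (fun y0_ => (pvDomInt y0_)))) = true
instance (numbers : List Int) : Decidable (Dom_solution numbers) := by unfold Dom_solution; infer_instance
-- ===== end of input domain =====

-- B replaces A's all-index-pairs catalog build with per-iteration list.remove by a counts dict over
-- unique values: sums of distinct unique values plus 2*v when v occurs at least twice; objective: faster.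


-- ===== PORT A =====
-- one outer iteration: append numbers[i]+numbers[l] for every l, then catalog.remove(numbers[i]*2)
def stepA (numbers : List Int) (oc : Option (List Int)) (x : Int) : Option (List Int) :=
  match oc with
  | none => none
  | some c => PySem.List.remove? (numbers.foldl (fun acc y => acc ++ [x + y]) c) (x * 2)

def solution (numbers : List Int) : List Int :=
  match numbers.foldl (stepA numbers) (some []) with
  | none => []  -- unreachable: the remove provably never raises ValueError (see the lemmas below)
  | some c => PySem.List.sorted (PySem.Set.ofList c) (fun v => v) false

-- ===== PORT B =====
-- while rest: v = rest.pop(0); for w in rest: sums.add(v + w)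
def addPairs : PySem.Set Int → List Int → PySem.Set Int
  | s, [] => s
  | s, v :: rest => addPairs (rest.foldl (fun s w => PySem.Set.add s (v + w)) s) rest

def solution_alt (numbers : List Int) : List Int :=
  let counts := numbers.foldl (fun d x => d.insert x (d.getD x 0 + 1)) (PySem.Dict.empty : PySem.Dict Int Int)
  let s := addPairs PySem.Set.empty counts.keys
  let s2 := counts.items.foldl (fun s p => if 2 ≤ p.2 then PySem.Set.add s (p.1 + p.1) else s) s
  PySem.List.sorted s2 (fun v => v) false

-- ===== PRECONDITION & SPEC =====
def Spec_solution (numbers : List Int) (out : List Int) : Prop := out = solution_alt numbers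
instance (numbers : List Int) (out : List Int) : Decidable (Spec_solution numbers out) := by unfold Spec_solution; infer_instance

-- ===== CLAIM (what is proved, stated in full; the proofs are below) =====
def Claim_equal_solution : Prop := ∀ (numbers : List Int), Dom_solution numbers → Spec_solution numbers (solution numbers)

-- ===== LEMMAS AND PROOFS =====

-- the common characterisation: v is the sum of two distinct-position elements of numbers
def Good (numbers : List Int) (v : Int) : Prop :=
  ∃ x, x ∈ numbers ∧ (if v - x = x then 2 else 1) ≤ numbers.count (v - x)

lemma count_map_add (numbers : List Int) (x v : Int) :
    (numbers.map (x + ·)).count v = numbers.count (v - x) := by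
  induction numbers with
  | nil => simp
  | cons y t ih =>
    simp only [List.map_cons, List.count_cons, ih]
    have : (x + y == v) = (y == v - x) := by
      rw [Bool.eq_iff_iff]
      simp only [beq_iff_eq]
      omega
    rw [this]

lemma count_flatMap (l : List Int) (g : Int → List Int) (v : Int) :
    (l.flatMap g).count v = (l.map (fun x => (g x).count v)).sum := by
  induction l with
  | nil => simp
  | cons x t ih => simp [List.flatMap_cons, List.count_append, ih]

lemma countP_eq_sum (l : List Int) (p : Int → Bool) :
    l.countP p = (l.map (fun x => if p x then 1 else 0)).sum := by
  induction l with
  | nil => simp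
  | cons x t ih =>
    by_cases h : p x <;> simp [h, ih, Nat.add_comm]

-- A's loop invariant: the fold never raises, and the multiset count of the catalog equals
-- (all pair sums appended so far) minus (one 2*x removed per processed x)
lemma loopA (numbers : List Int) :
    ∀ (l : List Int) (c : List Int), (∀ x ∈ l, x ∈ numbers) →
    ∃ c', l.foldl (stepA numbers) (some c) = some c' ∧
      ∀ v, c'.count v + l.countP (fun x => 2 * x == v) =
        c.count v + (l.flatMap (fun x => numbers.map (x + ·))).count v := by
  intro l
  induction l with
  | nil => intro c _; exact ⟨c, rfl, by simp⟩
  | cons x t ih =>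
    intro c hmem
    have hx : x ∈ numbers := hmem x (List.mem_cons_self)
    have hin : x * 2 ∈ c ++ numbers.map (x + ·) := by
      have : x + x ∈ numbers.map (x + ·) := List.mem_map_of_mem hx
      have hx2 : x * 2 = x + x := by ring
      rw [hx2]; exact List.mem_append_right _ this
    have hstep : stepA numbers (some c) x = some ((c ++ numbers.map (x + ·)).erase (x * 2)) := by
      simp only [stepA, PySem.List.foldl_append_singleton_eq_map]
      exact PySem.List.remove?_eq_some_erase _ _ hin
    obtain ⟨c', hc', hcount⟩ := ih ((c ++ numbers.map (x + ·)).erase (x * 2))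
      (fun y hy => hmem y (List.mem_cons_of_mem _ hy))
    refine ⟨c', by simpa [List.foldl_cons, hstep] using hc', ?_⟩
    intro v
    have h1 : ((c ++ numbers.map (x + ·)).erase (x * 2)).count v
        = (c ++ numbers.map (x + ·)).count v - if x * 2 = v then 1 else 0 := by
      rw [List.count_erase]
      have : (x * 2 == v) = decide (x * 2 = v) := by
        rw [Bool.eq_iff_iff]; simp
      rw [this]
      by_cases h : x * 2 = v <;> simp [h]
    have hpos : (if x * 2 = v then 1 else 0) ≤ (c ++ numbers.map (x + ·)).count v := by
      by_cases h : x * 2 = v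
      · rw [if_pos h]
        exact List.count_pos_iff.mpr (h ▸ hin)
      · rw [if_neg h]
        exact Nat.zero_le _
    have h2 := hcount v
    rw [h1] at h2
    have hcp : (x :: t).countP (fun x => 2 * x == v)
        = (if x * 2 = v then 1 else 0) + t.countP (fun x => 2 * x == v) := by
      rw [List.countP_cons]
      by_cases h : x * 2 = v
      · have : (2 * x == v) = true := by simp; omega
        simp [this, h, Nat.add_comm]
      · have : (2 * x == v) = false := by simp; omega
        simp [this, h]
    have hfm : ((x :: t).flatMap (fun x => numbers.map (x + ·))).count v
        = (numbers.map (x + ·)).count v + (t.flatMap (fun x => numbers.map (x + ·))).count v := by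
      simp [List.flatMap_cons, List.count_append]
    rw [hcp, hfm]
    simp only [List.count_append] at h2 hpos
    omega

lemma mem_foldl_add (f : Int → Int) :
    ∀ (l : List Int) (s : PySem.Set Int) (v : Int),
      v ∈ l.foldl (fun s w => PySem.Set.add s (f w)) s ↔ v ∈ s ∨ ∃ w ∈ l, v = f w := by
  intro l
  induction l with
  | nil => simp
  | cons x t ih =>
    intro s v
    simp only [List.foldl_cons, ih, PySem.Set.mem_add, List.mem_cons]
    constructor
    · rintro ((h | h) | ⟨w, hw, rfl⟩)
      · exact Or.inl h
      · exact Or.inr ⟨x, Or.inl rfl, h⟩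
      · exact Or.inr ⟨w, Or.inr hw, rfl⟩
    · rintro (h | ⟨w, (rfl | hw), rfl⟩)
      · exact Or.inl (Or.inl h)
      · exact Or.inl (Or.inr rfl)
      · exact Or.inr ⟨w, hw, rfl⟩

lemma nodup_foldl_add (f : Int → Int) :
    ∀ (l : List Int) (s : PySem.Set Int), s.Nodup →
      (l.foldl (fun s w => PySem.Set.add s (f w)) s).Nodup := by
  intro l
  induction l with
  | nil => intro s h; exact h
  | cons x t ih => intro s h; exact ih _ (PySem.Set.nodup_add _ _ h)

lemma mem_addPairs :
    ∀ (l : List Int), l.Nodup → ∀ (s : PySem.Set Int) (v : Int),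
      (v ∈ addPairs s l ↔ v ∈ s ∨ ∃ a b, a ∈ l ∧ b ∈ l ∧ a ≠ b ∧ v = a + b) := by
  intro l
  induction l with
  | nil => intro _ s v; simp [addPairs]
  | cons x t ih =>
    intro hnd s v
    have hxnot : x ∉ t := (List.nodup_cons.mp hnd).1
    have hndt : t.Nodup := (List.nodup_cons.mp hnd).2
    simp only [addPairs, ih hndt, mem_foldl_add]
    constructor
    · rintro ((h | ⟨w, hw, rfl⟩) | ⟨a, b, ha, hb, hab, rfl⟩)
      · exact Or.inl h
      · exact Or.inr ⟨x, w, List.mem_cons_self, List.mem_cons_of_mem _ hw,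
          fun h => hxnot (h ▸ hw), rfl⟩
      · exact Or.inr ⟨a, b, List.mem_cons_of_mem _ ha, List.mem_cons_of_mem _ hb, hab, rfl⟩
    · rintro (h | ⟨a, b, ha, hb, hab, rfl⟩)
      · exact Or.inl (Or.inl h)
      · rcases List.mem_cons.mp ha with ha' | ha'
        · subst ha'
          rcases List.mem_cons.mp hb with hb' | hb'
          · exact absurd hb'.symm hab
          · exact Or.inl (Or.inr ⟨b, hb', rfl⟩)
        · rcases List.mem_cons.mp hb with hb' | hb'
          · subst hb'
            exact Or.inl (Or.inr ⟨a, ha', by ring⟩)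
          · exact Or.inr ⟨a, b, ha', hb', hab, rfl⟩

lemma nodup_addPairs : ∀ (l : List Int) (s : PySem.Set Int), s.Nodup → (addPairs s l).Nodup := by
  intro l
  induction l with
  | nil => intro s h; exact h
  | cons x t ih => intro s h; exact ih _ (nodup_foldl_add _ _ _ h)

lemma mem_foldl_addIf :
    ∀ (l : List (Int × Int)) (s : PySem.Set Int) (v : Int),
      (v ∈ l.foldl (fun s p => if 2 ≤ p.2 then PySem.Set.add s (p.1 + p.1) else s) s ↔
        v ∈ s ∨ ∃ p ∈ l, 2 ≤ p.2 ∧ v = p.1 + p.1) := by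
  intro l
  induction l with
  | nil => simp
  | cons q t ih =>
    intro s v
    simp only [List.foldl_cons, List.mem_cons]
    by_cases h : 2 ≤ q.2
    · simp only [if_pos h, ih, PySem.Set.mem_add]
      constructor
      · rintro ((hs | rfl) | ⟨p, hp, h2, rfl⟩)
        · exact Or.inl hs
        · exact Or.inr ⟨q, Or.inl rfl, h, rfl⟩
        · exact Or.inr ⟨p, Or.inr hp, h2, rfl⟩
      · rintro (hs | ⟨p, (rfl | hp), h2, rfl⟩)
        · exact Or.inl (Or.inl hs)
        · exact Or.inl (Or.inr rfl)
        · exact Or.inr ⟨p, hp, h2, rfl⟩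
    · simp only [if_neg h, ih]
      constructor
      · rintro (hs | ⟨p, hp, h2, rfl⟩)
        · exact Or.inl hs
        · exact Or.inr ⟨p, Or.inr hp, h2, rfl⟩
      · rintro (hs | ⟨p, (rfl | hp), h2, rfl⟩)
        · exact Or.inl hs
        · exact absurd h2 h
        · exact Or.inr ⟨p, hp, h2, rfl⟩

lemma nodup_foldl_addIf :
    ∀ (l : List (Int × Int)) (s : PySem.Set Int), s.Nodup →
      (l.foldl (fun s p => if 2 ≤ p.2 then PySem.Set.add s (p.1 + p.1) else s) s).Nodup := by
  intro l
  induction l with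
  | nil => intro s h; exact h
  | cons q t ih =>
    intro s h
    simp only [List.foldl_cons]
    by_cases hq : 2 ≤ q.2
    · rw [if_pos hq]; exact ih _ (PySem.Set.nodup_add _ _ h)
    · rw [if_neg hq]; exact ih _ h

-- a termwise-≥ sum is strictly bigger iff some term is
lemma sum_lt_sum_iff (F G : Int → Nat) :
    ∀ (l : List Int), (∀ x ∈ l, G x ≤ F x) →
      ((l.map G).sum < (l.map F).sum ↔ ∃ x ∈ l, G x < F x) := by
  intro l
  induction l with
  | nil => simp
  | cons x t ih =>
    intro h
    have hx := h x List.mem_cons_self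
    have ht := fun y hy => h y (List.mem_cons_of_mem _ hy)
    have hsum : (t.map G).sum ≤ (t.map F).sum :=
      List.sum_le_sum (by simpa using ht)
    have := ih ht
    simp only [List.map_cons, List.sum_cons, List.mem_cons]
    constructor
    · intro hlt
      by_cases hc : G x < F x
      · exact ⟨x, Or.inl rfl, hc⟩
      · have hts : (t.map G).sum < (t.map F).sum := by omega
        obtain ⟨y, hy, h'⟩ := (ih ht).mp hts
        exact ⟨y, Or.inr hy, h'⟩
    · rintro ⟨y, (rfl | hy), h'⟩
      · omega
      · have := (ih ht).mpr ⟨y, hy, h'⟩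
        omega

lemma solution_mem (numbers : List Int) :
    ∃ c', numbers.foldl (stepA numbers) (some []) = some c' ∧
      ∀ v, (v ∈ c' ↔ Good numbers v) := by
  obtain ⟨c', hc', hcount⟩ := loopA numbers numbers [] (fun x h => h)
  refine ⟨c', hc', ?_⟩
  intro v
  have h := hcount v
  simp only [List.count_nil, Nat.zero_add] at h
  have hfm : (numbers.flatMap (fun x => numbers.map (x + ·))).count v
      = (numbers.map (fun x => numbers.count (v - x))).sum := by
    rw [count_flatMap]
    congr 1
    exact List.map_congr_left (fun x _ => count_map_add numbers x v)
  have hcp : numbers.countP (fun x => 2 * x == v)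
      = (numbers.map (fun x => if v - x = x then 1 else 0)).sum := by
    rw [countP_eq_sum]
    congr 1
    refine List.map_congr_left (fun x _ => ?_)
    by_cases hx : v - x = x
    · have : (2 * x == v) = true := by simp; omega
      simp [this, hx]
    · have : (2 * x == v) = false := by simp; omega
      simp [this, hx]
  rw [hfm, hcp] at h
  have hterm : ∀ x ∈ numbers, (if v - x = x then 1 else 0) ≤ numbers.count (v - x) := by
    intro x hx
    by_cases hc : v - x = x
    · rw [if_pos hc]
      have : v - x ∈ numbers := by rw [hc]; exact hx
      exact List.count_pos_iff.mpr this
    · rw [if_neg hc]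
      exact Nat.zero_le _
  have hiff := sum_lt_sum_iff (fun x => numbers.count (v - x))
      (fun x => if v - x = x then 1 else 0) numbers hterm
  constructor
  · intro hv
    have hpos : 0 < c'.count v := List.count_pos_iff.mpr hv
    have hlt : (numbers.map (fun x => if v - x = x then 1 else 0)).sum
        < (numbers.map (fun x => numbers.count (v - x))).sum := by omega
    obtain ⟨x, hx, hlt'⟩ := hiff.mp hlt
    refine ⟨x, hx, ?_⟩
    by_cases hc : v - x = x <;> simp [hc] at hlt' ⊢ <;> omega
  · rintro ⟨x, hx, hle⟩
    have hlt : (numbers.map (fun x => if v - x = x then 1 else 0)).sum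
        < (numbers.map (fun x => numbers.count (v - x))).sum := by
      refine hiff.mpr ⟨x, hx, ?_⟩
      by_cases hc : v - x = x <;> simp [hc] at hle ⊢ <;> omega
    have : 0 < c'.count v := by omega
    exact List.count_pos_iff.mp this

lemma solution_alt_mem (numbers : List Int) (v : Int) :
    (v ∈ (numbers.foldl (fun d x => d.insert x (d.getD x 0 + 1)) (PySem.Dict.empty : PySem.Dict Int Int)).items.foldl
          (fun s p => if 2 ≤ p.2 then PySem.Set.add s (p.1 + p.1) else s)
          (addPairs PySem.Set.empty
            (numbers.foldl (fun d x => d.insert x (d.getD x 0 + 1)) (PySem.Dict.empty : PySem.Dict Int Int)).keys)) ↔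
      Good numbers v := by
  rw [PySem.Dict.foldl_insert_getD_add_one_eq_counter, PySem.Dict.keys_counter,
    PySem.Dict.items_counter, mem_foldl_addIf,
    mem_addPairs (PySem.Set.ofList numbers) (PySem.Set.nodup_ofList numbers)]
  constructor
  · rintro ((h | ⟨a, b, ha, hb, hab, rfl⟩) | ⟨p, hp, h2, rfl⟩)
    · exact absurd h (by simp [PySem.Set.empty])
    · refine ⟨a, (PySem.Set.mem_ofList _ _).mp ha, ?_⟩
      have hb' : b ∈ numbers := (PySem.Set.mem_ofList _ _).mp hb
      have e : a + b - a = b := by ring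
      rw [e, if_neg (fun h => hab h.symm)]
      exact List.count_pos_iff.mpr hb'
    · obtain ⟨k, hk, rfl⟩ := List.mem_map.mp hp
      refine ⟨k, (PySem.Set.mem_ofList _ _).mp hk, ?_⟩
      have e : k + k - k = k := by ring
      rw [e, if_pos rfl]
      have h2' : (2 : Int) ≤ ((numbers.count k : Int)) := h2
      exact_mod_cast h2'
  · rintro ⟨x, hx, hle⟩
    by_cases hc : v - x = x
    · rw [if_pos hc, hc] at hle
      refine Or.inr ⟨(x, (numbers.count x : Int)),
        List.mem_map.mpr ⟨x, (PySem.Set.mem_ofList _ _).mpr hx, rfl⟩, ?_, by omega⟩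
      show (2 : Int) ≤ ((numbers.count x : Int))
      exact_mod_cast hle
    · rw [if_neg hc] at hle
      have hbmem : v - x ∈ numbers := List.count_pos_iff.mp hle
      exact Or.inl (Or.inr ⟨x, v - x, (PySem.Set.mem_ofList _ _).mpr hx,
        (PySem.Set.mem_ofList _ _).mpr hbmem, fun h => hc (by omega), by ring⟩)

-- ===== VERDICT (by name: the statement is the Claim_ definition above) =====
theorem solution_spec : Claim_equal_solution := by
  unfold Claim_equal_solution
  intro numbers _
  unfold Spec_solution solution solution_alt
  obtain ⟨c', hc', hmem⟩ := solution_mem numbers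
  rw [hc']
  show PySem.List.sorted (PySem.Set.ofList c') (fun v => v) false = _
  rw [PySem.List.sorted_id_eq_sorted_id_iff_perm]
  have hn1 : (PySem.Set.ofList c').Nodup := PySem.Set.nodup_ofList c'
  have hn2 := nodup_foldl_addIf
    ((numbers.foldl (fun d x => d.insert x (d.getD x 0 + 1)) (PySem.Dict.empty : PySem.Dict Int Int)).items)
    (addPairs PySem.Set.empty
      (numbers.foldl (fun d x => d.insert x (d.getD x 0 + 1)) (PySem.Dict.empty : PySem.Dict Int Int)).keys)
    (nodup_addPairs _ _ (by simp [PySem.Set.empty]))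
  refine (List.perm_ext_iff_of_nodup hn1 hn2).mpr ?_
  intro a
  rw [PySem.Set.mem_ofList, hmem a, solution_alt_mem numbers a]
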